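-- pv_equiv track=rewrite | github.com/juliahuergoucm/c2526-R5 | src/eventos/nycopendataHistorico.py | fusionar_lista_estaciones
-- ===== SOURCE A (Python) =====
-- from collections import defaultdict
--
-- def fusionar_lista_estaciones(lista_tuplas):
--     """Fusiona líneas con el mismo nombre de estación."""
--     if not isinstance(lista_tuplas, list):
--         return lista_tuplas
--
--     estaciones_fusionadas = defaultdict(set)
--     for nombre, lineas in lista_tuplas:
--         estaciones_fusionadas[nombre].update(str(lineas).split())
--
--     return [
--         (nombre, " ".join(sorted(lineas_set)))
--         for nombre, lineas_set in estaciones_fusionadas.items()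
--     ]
-- ===== SOURCE B (Python) =====
-- def fusionar_lista_estaciones(lista_tuplas):
--     """Fusiona líneas con el mismo nombre de estación."""
--     if not isinstance(lista_tuplas, list):
--         return lista_tuplas
--
--     # pass 1: distinct station names in first-appearance order
--     nombres = []
--     for nombre, _lineas in lista_tuplas:
--         if nombre not in nombres:
--             nombres.append(nombre)
--
--     # pass 2: for each distinct name, rescan the input gathering its tokens
--     resultado = []
--     for nombre in nombres:
--         tokens = set()
--         for n, lineas in lista_tuplas:
--             if n == nombre:
--                 tokens.update(str(lineas).split())
--         resultado.append((nombre, " ".join(sorted(tokens))))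
--     return resultado
-- ===== Notes on version B (the rewrite author's own statement) =====
-- stated objective: alternative
-- what changed: Replaces A's single-pass defaultdict(set) grouping with a two-pass scheme: first collect distinct names in first-appearance order, then for each name rescan the input to union its tokens.
import Mathlib
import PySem

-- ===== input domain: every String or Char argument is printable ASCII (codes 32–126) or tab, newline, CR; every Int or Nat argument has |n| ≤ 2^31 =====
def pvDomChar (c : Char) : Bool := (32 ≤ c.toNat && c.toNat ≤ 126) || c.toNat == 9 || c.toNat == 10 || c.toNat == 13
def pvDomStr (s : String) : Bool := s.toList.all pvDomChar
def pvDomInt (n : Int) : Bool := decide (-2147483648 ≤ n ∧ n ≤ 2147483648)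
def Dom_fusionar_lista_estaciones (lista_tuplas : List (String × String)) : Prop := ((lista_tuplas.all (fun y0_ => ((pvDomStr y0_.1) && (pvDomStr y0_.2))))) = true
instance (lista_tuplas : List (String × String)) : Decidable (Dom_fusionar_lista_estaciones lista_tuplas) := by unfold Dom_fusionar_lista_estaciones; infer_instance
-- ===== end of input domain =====

-- B replaces A's single-pass defaultdict(set) grouping by two passes: distinct names in first-appearance order, then a rescan per name to union its sorted tokens (alternative decomposition, no speed claim).
-- ===== PORT A =====
def fusionar_lista_estaciones (lista_tuplas : List (String × String)) : List (String × String) :=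
  let estaciones_fusionadas : PySem.Dict String (PySem.Set String) :=
    lista_tuplas.foldl
      (fun d p =>
        d.insert p.1 (PySem.Set.update (d.getD p.1 PySem.Set.empty) (PySem.Str.split₀ p.2)))
      PySem.Dict.empty
  estaciones_fusionadas.items.map
    (fun p => (p.1, PySem.Str.join " " (PySem.List.sorted p.2 (fun x => x) false)))

-- ===== PORT B =====
def fusionar_lista_estaciones_alt (lista_tuplas : List (String × String)) : List (String × String) :=
  let nombres : List String :=
    lista_tuplas.foldl (fun acc p => if p.1 ∈ acc then acc else acc ++ [p.1]) []
  nombres.map (fun nombre =>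
    let tokens : PySem.Set String :=
      lista_tuplas.foldl
        (fun s p => if p.1 = nombre then PySem.Set.update s (PySem.Str.split₀ p.2) else s)
        PySem.Set.empty
    (nombre, PySem.Str.join " " (PySem.List.sorted tokens (fun x => x) false)))

-- ===== PRECONDITION & SPEC =====
def Spec_fusionar_lista_estaciones (lista_tuplas : List (String × String)) (out : List (String × String)) : Prop := out = fusionar_lista_estaciones_alt lista_tuplas
instance (lista_tuplas : List (String × String)) (out : List (String × String)) : Decidable (Spec_fusionar_lista_estaciones lista_tuplas out) := by unfold Spec_fusionar_lista_estaciones; infer_instance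

-- ===== CLAIM (what is proved, stated in full; the proofs are below) =====
def Claim_equal_fusionar_lista_estaciones : Prop := ∀ (lista_tuplas : List (String × String)), Dom_fusionar_lista_estaciones lista_tuplas → Spec_fusionar_lista_estaciones lista_tuplas (fusionar_lista_estaciones lista_tuplas)

-- ===== LEMMAS AND PROOFS =====

-- ===== VERDICT (by name: the statement is the Claim_ definition above) =====
lemma getD_fold (l : List (String × String)) (d : PySem.Dict String (PySem.Set String)) (n : String) :
    (l.foldl
      (fun d p =>
        d.insert p.1 (PySem.Set.update (d.getD p.1 PySem.Set.empty) (PySem.Str.split₀ p.2)))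
      d).getD n PySem.Set.empty
    = l.foldl
        (fun s p => if p.1 = n then PySem.Set.update s (PySem.Str.split₀ p.2) else s)
        (d.getD n PySem.Set.empty) := by
  induction l generalizing d with
  | nil => rfl
  | cons h t ih =>
    simp only [List.foldl_cons, ih]
    rw [PySem.Dict.getD_insert]
    by_cases hn : h.1 = n
    · subst hn; simp
    · simp [hn, Ne.symm hn]

lemma nombres_fold (l : List (String × String)) (acc : PySem.Set String) :
    l.foldl (fun acc p => if p.1 ∈ acc then acc else acc ++ [p.1]) acc
    = (l.map Prod.fst).foldl PySem.Set.add acc := by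
  induction l generalizing acc with
  | nil => rfl
  | cons h t ih =>
    simp only [List.foldl_cons, List.map_cons, ih, PySem.Set.add, PySem.Set.contains]
    by_cases hm : h.1 ∈ acc <;> simp [hm]

theorem fusionar_lista_estaciones_spec : Claim_equal_fusionar_lista_estaciones := by
  intro l _
  unfold Spec_fusionar_lista_estaciones fusionar_lista_estaciones fusionar_lista_estaciones_alt
  simp only []
  have hnd : (l.foldl
      (fun d p =>
        d.insert p.1 (PySem.Set.update (d.getD p.1 PySem.Set.empty) (PySem.Str.split₀ p.2)))
      PySem.Dict.empty).keys.Nodup :=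
    PySem.Dict.nodup_keys_foldl_insert_key l Prod.fst _ _ PySem.Dict.nodup_keys_empty
  rw [PySem.Dict.items_eq_map_keys _ hnd PySem.Set.empty,
      PySem.Dict.keys_foldl_insert_key, nombres_fold, List.map_map]
  refine List.map_congr_left (fun n _ => ?_)
  simp only [Function.comp, getD_fold]
  rfl
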